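-- pv_equiv track=rewrite | github.com/chadmeyer/dominican-liturgy | preprocessor/process.py | process_flex
-- ===== SOURCE A (Python) =====
-- def latex_add(s,c):
--     return '\\'+c+'{'+s+'}'
--
-- def process_flex(l) :
--     trimmed_line = l[:-1]
--     ns = []
--     syllables = []
--     # First we "unzip" the line into words and the words into syllables
--     for w in trimmed_line :
--         ns.append(len(w.split('|')))
--         syllables.append(w.split('|'))
--     # Check for final accent
--     nw = len(trimmed_line)
--     found = False
--     for i in range( nw - 1, -1, -1) :
--         for j in range( ns[i] - 1, -1, -1) :
--             #First, check for accent: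
--             if '^' in syllables[i][j]:
--                 #We found an accent
--                 if i == nw - 1 and j == ns[i]-1:
--                     # This is really the last syllable
--                     syllables[i][j] = latex_add(syllables[i][j],"flexfinalsyllableaccent")
--                     if ns[i] > 1 :
--                         syllables[i][j-1] = latex_add(syllables[i][j-1],"flexvirtualfinalaccent")
--                     else:
--                         syllables[i-1][-1] = latex_add(syllables[i-1][-1],"flexvirtualfinalaccent")
--                 else:
--                     syllables[i][j] = latex_add(syllables[i][j], "flexfinalaccent")
--                 found = True
--                 break
--             else:
--                 syllables[i][j] = latex_add(syllables[i][j],"flexpostaccent")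
--         if found : break
--     # Now, zip up the string again
--     ol = []
--     for w in syllables :
--         ol.append(''.join(w))
--     out = ' '.join(ol)
--     out += " \\flexsymbol"
--     out = out.replace('^','')
--     return out
-- ===== SOURCE B (Python) =====
-- def process_flex(l):
--     # Functional rewrite: find the last accented syllable once, then mark by position.
--     words = [w.split('|') for w in l[:-1]]
--     acc = None
--     for i, w in enumerate(words):
--         for j, s in enumerate(w):
--             if '^' in s:
--                 acc = (i, j)
--     def wrap(s, c):
--         return '\\' + c + '{' + s + '}'
--     if acc is None:
--         marked = [[wrap(s, "flexpostaccent") for s in w] for w in words]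
--     else:
--         ai, aj = acc
--         marked = [[wrap(s, "flexpostaccent") if (i, j) > (ai, aj) else s
--                    for j, s in enumerate(w)] for i, w in enumerate(words)]
--         if ai == len(words) - 1 and aj == len(words[ai]) - 1:
--             # accent on the very last syllable of the line
--             marked[ai][aj] = wrap(marked[ai][aj], "flexfinalsyllableaccent")
--             if aj > 0:
--                 marked[ai][aj - 1] = wrap(marked[ai][aj - 1], "flexvirtualfinalaccent")
--             elif ai > 0:
--                 marked[ai - 1][-1] = wrap(marked[ai - 1][-1], "flexvirtualfinalaccent")
--         else:
--             marked[ai][aj] = wrap(marked[ai][aj], "flexfinalaccent")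
--     out = ' '.join(''.join(w) for w in marked) + " \\flexsymbol"
--     return out.replace('^', '')
-- ===== Notes on version B (the rewrite author's own statement) =====
-- stated objective: alternative
-- what changed: A mutates the syllable matrix in a backward nested scan with break (postaccent-wrapping as it searches); B is a functional forward rewrite: one pass records the last accented position, then the matrix is rebuilt by position with comprehensions and the accent commands applied at the computed indices.
-- intended difference: On a line whose trimmed part is a single one-syllable accented word (len(l)==2, '|' not in l[0], '^' in l[0]) A's negative-index wraparound wraps \flexvirtualfinalaccent around the accented syllable itself, while B marks no virtual accent since no syllable precedes the accent; B's is the intended value. — e.g. on process_flex(["a^", "b"]): A returns "\\flexvirtualfinalaccent{\\flexfinalsyllableaccent{a}} \\flexsymbol", B returns "\\flexfinalsyllableaccent{a} \\flexsymbol"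
import Mathlib
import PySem

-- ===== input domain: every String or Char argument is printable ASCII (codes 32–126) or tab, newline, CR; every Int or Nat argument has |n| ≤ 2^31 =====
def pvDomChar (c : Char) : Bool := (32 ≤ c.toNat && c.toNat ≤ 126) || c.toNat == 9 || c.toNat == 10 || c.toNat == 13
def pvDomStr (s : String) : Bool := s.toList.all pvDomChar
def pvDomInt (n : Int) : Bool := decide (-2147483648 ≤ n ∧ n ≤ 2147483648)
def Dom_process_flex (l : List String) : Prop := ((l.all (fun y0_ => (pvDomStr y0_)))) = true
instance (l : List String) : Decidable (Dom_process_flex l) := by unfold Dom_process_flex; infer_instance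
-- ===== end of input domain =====

-- B replaces A's backward nested scan-with-break and in-place mutation by a functional
-- forward rewrite: locate the last accented syllable once, then mark syllables by position
-- (objective: alternative decomposition, same cost); on single-word one-syllable accented
-- lines B differs from A as stated at D_process_flex below.

-- shared 2-d Python indexing helpers (syllables[i][j] read / write, Python index semantics;
-- exact wherever the index is in range, which is everywhere either program indexes)
def mGet (m : List (List String)) (i j : Int) : String :=
  PySem.List.pyGetD (PySem.List.pyGetD m i []) j ""
def mSet (m : List (List String)) (i j : Int) (v : String) : List (List String) :=
  PySem.List.pySetD m i (PySem.List.pySetD (PySem.List.pyGetD m i []) j v)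

-- ===== PORT A =====
def latex_add (s c : String) : String := "\\" ++ c ++ "{" ++ s ++ "}"

-- w.split('|'): separator is the non-empty literal "|", so split? always returns some
def pySplitBar (w : String) : List String := (PySem.Str.split? w "|").getD []

-- inner 'for j in range(ns[i]-1,-1,-1)' with its break: returns (syllables, found)
def innerA (nw : Int) (ns : List Int) (syll : List (List String)) (i : Int) :
    List Int → List (List String) × Bool
  | [] => (syll, false)
  | j :: js =>
    if PySem.Str.isIn "^" (mGet syll i j) then
      if i == nw - 1 && j == PySem.List.pyGetD ns i 0 - 1 then
        let syll1 := mSet syll i j (latex_add (mGet syll i j) "flexfinalsyllableaccent")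
        let syll2 :=
          if PySem.List.pyGetD ns i 0 > 1 then
            mSet syll1 i (j-1) (latex_add (mGet syll1 i (j-1)) "flexvirtualfinalaccent")
          else
            mSet syll1 (i-1) (-1) (latex_add (mGet syll1 (i-1) (-1)) "flexvirtualfinalaccent")
        (syll2, true)
      else
        (mSet syll i j (latex_add (mGet syll i j) "flexfinalaccent"), true)
    else
      innerA nw ns (mSet syll i j (latex_add (mGet syll i j) "flexpostaccent")) i js

-- outer 'for i in range(nw-1,-1,-1)' with 'if found: break'
def outerA (nw : Int) (ns : List Int) (syll : List (List String)) :
    List Int → List (List String)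
  | [] => syll
  | i :: is' =>
    let r := innerA nw ns syll i (PySem.List.pyRange (PySem.List.pyGetD ns i 0 - 1) (-1) (-1))
    if r.2 then r.1 else outerA nw ns r.1 is'

def process_flex (l : List String) : String :=
  let trimmed_line := PySem.List.slice l none (some (-1))
  let ns : List Int := trimmed_line.foldl (fun a w => a ++ [((pySplitBar w).length : Int)]) []
  let syllables := trimmed_line.foldl (fun a w => a ++ [pySplitBar w]) []
  let nw : Int := trimmed_line.length
  let syllables := outerA nw ns syllables (PySem.List.pyRange (nw - 1) (-1) (-1))
  let ol := syllables.foldl (fun a w => a ++ [PySem.Str.join "" w]) []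
  let out := PySem.Str.join " " ol
  let out := out ++ " \\flexsymbol"
  PySem.Str.replace out "^" ""

-- ===== PORT B =====
-- (Source B's local helper `wrap` is the same function as the module helper latex_add;
--  the port reuses latex_add for it)
-- the forward scan recording the LAST accented position
def bAcc (words : List (List String)) : Option (Int × Int) :=
  (PySem.List.enumerate words 0).foldl
    (fun a iw =>
      (PySem.List.enumerate iw.2 0).foldl
        (fun a js => if PySem.Str.isIn "^" js.2 then some (iw.1, js.1) else a) a)
    none

def bFinish (marked : List (List String)) : String :=
  PySem.Str.replace
    (PySem.Str.join " " (marked.map (fun w => PySem.Str.join "" w)) ++ " \\flexsymbol") "^" ""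

def process_flex_alt (l : List String) : String :=
  let words := (PySem.List.slice l none (some (-1))).map (fun w => (PySem.Str.split? w "|").getD [])
  match bAcc words with
  | none => bFinish (words.map (fun w => w.map (fun s => latex_add s "flexpostaccent")))
  | some (ai, aj) =>
    let marked := (PySem.List.enumerate words 0).map (fun iw =>
      (PySem.List.enumerate iw.2 0).map (fun js =>
        if iw.1 > ai ∨ (iw.1 = ai ∧ js.1 > aj) then latex_add js.2 "flexpostaccent" else js.2))
    let marked :=
      if ai == (words.length : Int) - 1
          && aj == ((PySem.List.pyGetD words ai []).length : Int) - 1 then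
        -- accent on the very last syllable of the line
        let m1 := mSet marked ai aj (latex_add (mGet marked ai aj) "flexfinalsyllableaccent")
        if aj > 0 then
          mSet m1 ai (aj-1) (latex_add (mGet m1 ai (aj-1)) "flexvirtualfinalaccent")
        else if ai > 0 then
          mSet m1 (ai-1) (-1) (latex_add (mGet m1 (ai-1) (-1)) "flexvirtualfinalaccent")
        else m1
      else
        mSet marked ai aj (latex_add (mGet marked ai aj) "flexfinalaccent")
    bFinish marked

-- ===== PRECONDITION & SPEC =====
-- On a line whose trimmed part is a single one-syllable accented word (l.length = 2,
-- no '|' split in l[0], '^' in l[0]) A's negative-index wraparound wraps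
-- \flexvirtualfinalaccent around the accented syllable itself; B marks no virtual accent
-- there since no syllable precedes the accent — B's is the intended value.
def D_process_flex (l : List String) : Prop :=
  l.length = 2 ∧ ((PySem.Str.split? (l.getD 0 "") "|").getD []).length = 1 ∧
  PySem.Str.isIn "^" (((PySem.Str.split? (l.getD 0 "") "|").getD []).getD 0 "") = true
instance (l : List String) : Decidable (D_process_flex l) := by unfold D_process_flex; infer_instance

def Spec_process_flex (l : List String) (out : String) : Prop :=
  ¬ D_process_flex l → out = process_flex_alt l
instance (l : List String) (out : String) : Decidable (Spec_process_flex l out) := by unfold Spec_process_flex; infer_instance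

def pvDiffWitness_process_flex : List String := ["a^", "b"]
def pvDiffWitnessOut_process_flex : String × String :=
  ("\\flexvirtualfinalaccent{\\flexfinalsyllableaccent{a}} \\flexsymbol",
   "\\flexfinalsyllableaccent{a} \\flexsymbol")

-- ===== CLAIM (what is proved, stated in full; the proofs are below) =====
def Claim_unchanged_process_flex : Prop := ∀ (l : List String), Dom_process_flex l → Spec_process_flex l (process_flex l)
def Claim_changed_process_flex : Prop := Dom_process_flex (pvDiffWitness_process_flex) ∧ D_process_flex (pvDiffWitness_process_flex) ∧ process_flex (pvDiffWitness_process_flex) = pvDiffWitnessOut_process_flex.1 ∧ process_flex_alt (pvDiffWitness_process_flex) = pvDiffWitnessOut_process_flex.2 ∧ pvDiffWitnessOut_process_flex.1 ≠ pvDiffWitnessOut_process_flex.2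
def Claim_exact_process_flex : Prop := ∀ (l : List String), Dom_process_flex l → D_process_flex l → process_flex l ≠ process_flex_alt l

-- ===== LEMMAS AND PROOFS =====

-- abbreviations used only by the proofs
def post (s : String) : String := latex_add s "flexpostaccent"

def nsOf (ws : List (List String)) : List Int := ws.map (fun w => ((w.length : Nat) : Int))

-- row with all positions ≥ t postaccent-wrapped
def rowMark (w : List String) (t : Nat) : List String :=
  w.mapIdx (fun j s => if t ≤ j then post s else s)

-- matrix with all rows ≥ t fully postaccent-wrapped
def matNone (ws : List (List String)) (t : Nat) : List (List String) :=
  ws.mapIdx (fun i w => if t ≤ i then rowMark w 0 else w)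

-- matrix with everything lexicographically after position (i, t-1) postaccent-wrapped
def matAcc (ws : List (List String)) (i t : Nat) : List (List String) :=
  ws.mapIdx (fun i' w => if i' < i then w else if i' = i then rowMark w t else rowMark w 0)

-- A's accent branch, as a function of the pre-write matrix
def accWrite (nw : Int) (ns : List Int) (m : List (List String)) (i j : Int) :
    List (List String) :=
  if i == nw - 1 && j == PySem.List.pyGetD ns i 0 - 1 then
    let m1 := mSet m i j (latex_add (mGet m i j) "flexfinalsyllableaccent")
    if PySem.List.pyGetD ns i 0 > 1 then
      mSet m1 i (j-1) (latex_add (mGet m1 i (j-1)) "flexvirtualfinalaccent")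
    else
      mSet m1 (i-1) (-1) (latex_add (mGet m1 (i-1) (-1)) "flexvirtualfinalaccent")
  else mSet m i j (latex_add (mGet m i j) "flexfinalaccent")

-- index of the last accented syllable of a word
def lastAcc : List String → Option Nat
  | [] => none
  | s :: t =>
    match lastAcc t with
    | some k => some (k+1)
    | none => if PySem.Str.isIn "^" s then some 0 else none

-- position of the last accented syllable of a line
def accPos : List (List String) → Option (Nat × Nat)
  | [] => none
  | w :: t =>
    match accPos t with
    | some (i, j) => some (i+1, j)
    | none => (lastAcc w).map (fun j => (0, j))

-- ---- small facts ----

theorem lastAcc_append (xs : List String) (x : String) :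
    lastAcc (xs ++ [x]) =
      if PySem.Str.isIn "^" x then some xs.length else lastAcc xs := by
  induction xs with
  | nil =>
    simp only [List.nil_append, lastAcc]
    cases hx : PySem.Str.isIn "^" x <;> simp [lastAcc]
  | cons a t ih =>
    simp only [List.cons_append, lastAcc, ih]
    cases hx : PySem.Str.isIn "^" x
    · simp
    · simp only [if_true]
      cases h' : lastAcc t <;> simp

theorem lastAcc_getElem (w : List String) (k : Nat) (h : lastAcc w = some k) :
    ∃ hk : k < w.length, PySem.Str.isIn "^" w[k] = true := by
  induction w generalizing k with
  | nil => simp [lastAcc] at h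
  | cons a t ih =>
    simp only [lastAcc] at h
    cases h' : lastAcc t with
    | some m =>
      rw [h'] at h; cases h
      obtain ⟨hm, hacc⟩ := ih m h'
      exact ⟨by simpa using by omega, by simpa using hacc⟩
    | none =>
      rw [h'] at h
      cases hx : PySem.Str.isIn "^" a <;> rw [hx] at h
      · simp at h
      · simp at h; subst h; exact ⟨by simp, by simpa using hx⟩

theorem accPos_append (xs : List (List String)) (w : List String) :
    accPos (xs ++ [w]) =
      match lastAcc w with
      | some j => some (xs.length, j)
      | none => accPos xs := by
  induction xs with
  | nil =>
    simp only [List.nil_append, accPos]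
    cases h : lastAcc w <;> simp
  | cons a t ih =>
    simp only [List.cons_append, accPos, ih]
    cases h : lastAcc w
    · simp
    · cases h' : accPos t <;> simp

theorem accPos_bounds (ws : List (List String)) (ai aj : Nat)
    (h : accPos ws = some (ai, aj)) :
    ∃ hi : ai < ws.length, ∃ hj : aj < ws[ai].length, PySem.Str.isIn "^" ws[ai][aj] = true := by
  induction ws generalizing ai aj with
  | nil => simp [accPos] at h
  | cons a t ih =>
    simp only [accPos] at h
    cases h' : accPos t with
    | some p =>
      rw [h'] at h
      obtain ⟨i, j⟩ := p
      simp at h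
      obtain ⟨rfl, rfl⟩ := h
      obtain ⟨hi, hj, hacc⟩ := ih i j h'
      exact ⟨by simp; omega, by simpa using hj, by simpa using hacc⟩
    | none =>
      rw [h'] at h
      cases hl : lastAcc a with
      | none => rw [hl] at h; simp at h
      | some k =>
        rw [hl] at h; simp at h
        obtain ⟨rfl, rfl⟩ := h
        obtain ⟨hk, hacc⟩ := lastAcc_getElem a k hl
        exact ⟨by simp, by simpa using hk, by simpa using hacc⟩

-- ---- bAcc agrees with accPos ----

theorem bAcc_inner (w : List String) (s : Int) (a : Option (Int × Int)) (i : Int) :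
    (PySem.List.enumerate w s).foldl
        (fun a js => if PySem.Str.isIn "^" js.2 then some (i, js.1) else a) a =
      match lastAcc w with
      | some k => some (i, s + (k : Int))
      | none => a := by
  induction w generalizing s a with
  | nil => simp [lastAcc]
  | cons x t ih =>
    rw [PySem.List.enumerate_cons]
    simp only [List.foldl_cons, lastAcc]
    rw [ih]
    cases h' : lastAcc t with
    | some k => simp; omega
    | none =>
      cases hx : PySem.Str.isIn "^" x <;> simp [hx]

theorem bAcc_eq (ws : List (List String)) :
    bAcc ws = (accPos ws).map (fun p => ((p.1 : Int), (p.2 : Int))) := by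
  suffices h : ∀ (s : Int) (a : Option (Int × Int)),
      (PySem.List.enumerate ws s).foldl
        (fun a iw =>
          (PySem.List.enumerate iw.2 0).foldl
            (fun a js => if PySem.Str.isIn "^" js.2 then some (iw.1, js.1) else a) a) a =
      match accPos ws with
      | some p => some (s + (p.1 : Int), (p.2 : Int))
      | none => a by
    rw [bAcc, h 0 none]
    cases hp : accPos ws with
    | none => rfl
    | some p => simp
  induction ws with
  | nil => intro s a; simp [accPos]
  | cons w t ih =>
    intro s a
    rw [PySem.List.enumerate_cons]
    simp only [List.foldl_cons]
    rw [ih, bAcc_inner]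
    simp only [accPos]
    cases hp : accPos t with
    | some p => simp; omega
    | none =>
      cases hl : lastAcc w <;> simp

-- ---- indexing facts about the marked matrices ----

theorem rowMark_length_self (w : List String) : rowMark w w.length = w := by
  apply List.ext_getElem (by simp [rowMark])
  intro j h1 h2
  simp [rowMark]
  omega

theorem rowMark_zero (w : List String) : rowMark w 0 = w.map post := by
  apply List.ext_getElem (by simp [rowMark])
  intro j h1 h2
  simp [rowMark]

theorem rowMark_set (w : List String) (k : Nat) (hk : k < w.length) :
    (rowMark w (k+1)).set k (post (w.getD k "")) = rowMark w k := by
  apply List.ext_getElem (by simp [rowMark])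
  intro j h1 h2
  rw [List.getElem_set]
  simp only [rowMark, List.getElem_mapIdx]
  split
  · rename_i h; subst h; simp [List.getD, List.getElem?_eq_getElem hk]
  · rename_i h
    have hj : j < w.length := by simpa [rowMark] using h1
    by_cases hle : k ≤ j
    · have : k + 1 ≤ j := by omega
      simp [this, hle]
    · have h1' : ¬ (k+1 ≤ j) := by omega
      simp [h1', hle]

theorem matAcc_zero (ws : List (List String)) (i : Nat) : matAcc ws i 0 = matNone ws i := by
  apply List.ext_getElem (by simp [matAcc, matNone])
  intro j h1 h2
  simp only [matAcc, matNone, List.getElem_mapIdx]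
  split_ifs with h h2' h3' <;> try rfl
  all_goals omega

theorem matNone_length_self (ws : List (List String)) : matNone ws ws.length = ws := by
  apply List.ext_getElem (by simp [matNone])
  intro j h1 h2
  simp only [matNone, List.getElem_mapIdx]
  have : ¬ ws.length ≤ j := by simpa [matNone] using by omega
  simp [this]

theorem matAcc_row (ws : List (List String)) (i t : Nat) (hi : i < ws.length) :
    (matAcc ws i t).getD i [] = rowMark (ws.getD i []) t := by
  have h2 : i < (matAcc ws i t).length := by simpa [matAcc] using hi
  rw [List.getD, List.getElem?_eq_getElem h2, List.getD, List.getElem?_eq_getElem hi]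
  simp [matAcc]

theorem matAcc_set_row (ws : List (List String)) (i t : Nat) (hi : i < ws.length) (r : List String) :
    (matAcc ws i t).set i r = ws.mapIdx (fun i' w => if i' < i then w else if i' = i then r else rowMark w 0) := by
  apply List.ext_getElem (by simp [matAcc])
  intro j h1 h2
  rw [List.getElem_set]
  simp only [matAcc, List.getElem_mapIdx]
  split
  · rename_i h; subst h; simp [hi]
  · rename_i h
    by_cases hj : j < i
    · simp [hj]
    · have hne : j ≠ i := fun hc => h hc.symm
      simp [hj, hne]

theorem matAcc_full_row (ws : List (List String)) (i : Nat) (hi : i < ws.length) :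
    matAcc ws i ((ws.getD i []).length) = matNone ws (i+1) := by
  apply List.ext_getElem (by simp [matAcc, matNone])
  intro j h1 h2
  simp only [matAcc, matNone, List.getElem_mapIdx]
  have hws : j < ws.length := by simpa [matAcc] using h1
  by_cases h : j < i
  · simp [h, (by omega : ¬ i + 1 ≤ j)]; omega
  · by_cases he : j = i
    · subst he
      have hg : ws.getD j [] = ws[j] := by
        rw [List.getD_eq_getElem?_getD, List.getElem?_eq_getElem hi]; rfl
      simp only [h, if_false, if_pos rfl, (by omega : ¬ j + 1 ≤ j), reduceIte, hg]
      simp [rowMark_length_self]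
    · simp [h, he, (by omega : i + 1 ≤ j)]

-- ---- the inner loop of A ----

theorem rowMark_getD_lt (w : List String) (t j : Nat) (hj : j < w.length) (h : j < t) :
    (rowMark w t).getD j "" = w.getD j "" := by
  have hj' : j < (rowMark w t).length := by simpa [rowMark] using hj
  rw [List.getD_eq_getElem?_getD, List.getElem?_eq_getElem hj',
      List.getD_eq_getElem?_getD, List.getElem?_eq_getElem hj]
  simp only [rowMark, List.getElem_mapIdx]
  rw [if_neg (by omega)]

theorem mGet_matAcc (ws : List (List String)) (i t j : Nat) (hi : i < ws.length)
    (hj : j < (ws.getD i []).length) (hjt : j < t) :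
    mGet (matAcc ws i t) (i : Int) (j : Int) = (ws.getD i []).getD j "" := by
  rw [mGet, PySem.List.pyGetD_natCast, PySem.List.pyGetD_natCast, matAcc_row ws i t hi,
      rowMark_getD_lt _ _ _ hj hjt]

theorem mSet_matAcc (ws : List (List String)) (i k : Nat) (hi : i < ws.length)
    (hk : k < (ws.getD i []).length) :
    mSet (matAcc ws i (k+1)) (i : Int) (k : Int) (post ((ws.getD i []).getD k "")) =
      matAcc ws i k := by
  rw [mSet, PySem.List.pySetD_natCast, PySem.List.pyGetD_natCast, PySem.List.pySetD_natCast,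
      matAcc_row ws i (k+1) hi, rowMark_set _ _ hk, matAcc_set_row ws i (k+1) hi]
  apply List.ext_getElem (by simp [matAcc])
  intro j h1 h2
  simp only [matAcc, List.getElem_mapIdx]
  by_cases h : j < i
  · simp [h]
  · by_cases he : j = i
    · subst he
      have hg : ws.getD j [] = ws[j] := by
        rw [List.getD_eq_getElem?_getD, List.getElem?_eq_getElem hi]; rfl
      simp only [hg, h, if_pos rfl, reduceIte]
    · simp [h, he]

theorem take_succ_concat {α : Type} (w : List α) (d : α) (k : Nat) (hk : k < w.length) :
    w.take (k+1) = w.take k ++ [w.getD k d] := by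
  rw [List.take_succ, List.getElem?_eq_getElem hk]
  simp [List.getD, List.getElem?_eq_getElem hk]

theorem innerA_accent (nw : Int) (ns : List Int) (m : List (List String)) (i j : Int)
    (js : List Int) (h : PySem.Str.isIn "^" (mGet m i j) = true) :
    innerA nw ns m i (j :: js) = (accWrite nw ns m i j, true) := by
  simp only [innerA, h, if_true, accWrite]
  split <;> rfl

theorem innerA_char (ws : List (List String)) (i k : Nat)
    (hi : i < ws.length) (hk : k < (ws.getD i []).length) :
    innerA (ws.length : Int) (nsOf ws) (matAcc ws i (k+1)) (i : Int)
        (PySem.List.pyRange (k : Int) (-1) (-1)) =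
      match lastAcc ((ws.getD i []).take (k+1)) with
      | none => (matAcc ws i 0, false)
      | some aj => (accWrite (ws.length : Int) (nsOf ws) (matAcc ws i (aj+1)) (i : Int) (aj : Int), true) := by
  induction k with
  | zero =>
    have hTake : lastAcc ((ws.getD i []).take (0+1)) =
        if PySem.Str.isIn "^" ((ws.getD i []).getD 0 "") then some 0 else none := by
      rw [take_succ_concat _ "" _ hk, lastAcc_append]
      simp [lastAcc]
    rw [PySem.List.pyRange_neg_one_cons (by omega), hTake]
    have hm := mGet_matAcc ws i 1 0 hi hk (by omega)
    cases hx : PySem.Str.isIn "^" ((ws.getD i []).getD 0 "")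
    · rw [if_neg (by simp)]
      show innerA _ _ _ _ (_ :: PySem.List.pyRange ((0:Int) - 1) (-1) (-1)) = _
      have hr : PySem.List.pyRange ((0:Int) - 1) (-1) (-1) = [] := by decide
      rw [hr]
      simp only [innerA, hm, hx, Bool.false_eq_true, reduceIte]
      rw [← show post ((ws.getD i []).getD 0 "") = latex_add ((ws.getD i []).getD 0 "") "flexpostaccent" from rfl]
      rw [mSet_matAcc ws i 0 hi hk]
    · rw [innerA_accent _ _ _ _ _ _ (by rw [hm]; exact hx), if_pos rfl]
  | succ k' ih =>
    have hTake : lastAcc ((ws.getD i []).take (k'+1+1)) =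
        if PySem.Str.isIn "^" ((ws.getD i []).getD (k'+1) "") then some (k'+1)
        else lastAcc ((ws.getD i []).take (k'+1)) := by
      rw [take_succ_concat _ "" _ hk, lastAcc_append, List.length_take,
          Nat.min_eq_left (by omega)]
    rw [PySem.List.pyRange_neg_one_cons (by omega), hTake]
    have hm := mGet_matAcc ws i (k'+1+1) (k'+1) hi hk (by omega)
    cases hx : PySem.Str.isIn "^" ((ws.getD i []).getD (k'+1) "")
    · rw [if_neg (by simp)]
      show innerA _ _ _ _ (_ :: PySem.List.pyRange (((k'+1:Nat):Int) - 1) (-1) (-1)) = _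
      have hc : (((k'+1:Nat):Int) - 1) = ((k' : Nat) : Int) := by push_cast; ring
      rw [hc]
      simp only [innerA, hm, hx, Bool.false_eq_true, reduceIte]
      rw [← show post ((ws.getD i []).getD (k'+1) "") = latex_add ((ws.getD i []).getD (k'+1) "") "flexpostaccent" from rfl]
      rw [mSet_matAcc ws i (k'+1) hi hk]
      exact ih (by omega)
    · rw [innerA_accent _ _ _ _ _ _ (by rw [hm]; exact hx), if_pos rfl]

-- ---- the outer loop of A ----

theorem pyRange_neg_nil : PySem.List.pyRange (-1) (-1) (-1) = [] := by decide

theorem nsOf_getD (ws : List (List String)) (i : Nat) (hi : i < ws.length) :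
    PySem.List.pyGetD (nsOf ws) (i : Int) 0 = (((ws.getD i []).length : Nat) : Int) := by
  rw [PySem.List.pyGetD_natCast, nsOf]
  rw [List.getD_eq_getElem?_getD, List.getElem?_map, List.getElem?_eq_getElem hi,
      List.getD_eq_getElem?_getD, List.getElem?_eq_getElem hi]
  rfl

theorem matNone_succ_empty (ws : List (List String)) (i : Nat)
    (h : ws.getD i [] = []) : matNone ws (i+1) = matNone ws i := by
  apply List.ext_getElem (by simp [matNone])
  intro j h1 h2
  simp only [matNone, List.getElem_mapIdx]
  have hws : j < ws.length := by simpa [matNone] using h1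
  by_cases hj : j = i
  · subst hj
    have : ws[j] = [] := by
      rw [List.getD_eq_getElem?_getD, List.getElem?_eq_getElem hws] at h; exact h
    simp [this, rowMark]
  · by_cases hle : i + 1 ≤ j
    · simp [hle, (by omega : i ≤ j)]
    · by_cases hle2 : i ≤ j
      · omega
      · simp [hle, hle2]

theorem outerA_step (ws : List (List String)) (i : Nat) (hi : i < ws.length) (rest : List Int) :
    outerA (ws.length : Int) (nsOf ws) (matNone ws (i+1)) ((i : Int) :: rest) =
      match lastAcc (ws.getD i []) with
      | some aj => accWrite (ws.length : Int) (nsOf ws) (matAcc ws i (aj+1)) (i : Int) (aj : Int)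
      | none => outerA (ws.length : Int) (nsOf ws) (matNone ws i) rest := by
  show (let r := innerA _ _ _ _ (PySem.List.pyRange (PySem.List.pyGetD (nsOf ws) (i:Int) 0 - 1) (-1) (-1));
        if r.2 then r.1 else outerA _ _ r.1 rest) = _
  rw [nsOf_getD ws i hi]
  cases hlen : (ws.getD i []).length with
  | zero =>
    have hw : ws.getD i [] = [] := List.length_eq_zero_iff.mp hlen
    have hc : (((0:Nat):Int) - 1) = (-1 : Int) := by norm_num
    rw [hc, pyRange_neg_nil]
    show (if (innerA (ws.length : Int) (nsOf ws) (matNone ws (i+1)) (i : Int) []).2 = true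
          then _ else outerA _ _ (innerA (ws.length : Int) (nsOf ws) (matNone ws (i+1)) (i : Int) []).1 rest) = _
    rw [show innerA (ws.length : Int) (nsOf ws) (matNone ws (i+1)) (i : Int) [] = (matNone ws (i+1), false) from rfl]
    rw [matNone_succ_empty ws i hw, hw]
    rfl
  | succ l =>
    have hc : (((l+1:Nat):Int) - 1) = ((l:Nat) : Int) := by push_cast; ring
    rw [hc]
    rw [show matNone ws (i+1) = matAcc ws i (l+1) from by
      rw [← hlen]; exact (matAcc_full_row ws i hi).symm]
    have hkk : l < (ws.getD i []).length := by omega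
    rw [innerA_char ws i l hi hkk]
    have htake : (ws.getD i []).take (l+1) = ws.getD i [] := by
      rw [← hlen]; exact List.take_length
    rw [htake]
    cases hla : lastAcc (ws.getD i []) with
    | some aj => rfl
    | none =>
      show outerA _ _ (matAcc ws i 0) rest = _
      rw [matAcc_zero]

theorem accPos_take_succ (ws : List (List String)) (i : Nat) (hi : i < ws.length) :
    accPos (ws.take (i+1)) =
      match lastAcc (ws.getD i []) with
      | some j => some (i, j)
      | none => accPos (ws.take i) := by
  rw [take_succ_concat ws [] i hi, accPos_append]
  cases hla : lastAcc (ws.getD i []) with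
  | some j => simp [List.length_take, Nat.min_eq_left (by omega : i ≤ ws.length)]
  | none => rfl

theorem outerA_char (ws : List (List String)) (i : Nat) (hi : i < ws.length) :
    outerA (ws.length : Int) (nsOf ws) (matNone ws (i+1))
        (PySem.List.pyRange (i : Int) (-1) (-1)) =
      match accPos (ws.take (i+1)) with
      | none => matNone ws 0
      | some (ai, aj) => accWrite (ws.length : Int) (nsOf ws) (matAcc ws ai (aj+1)) (ai : Int) (aj : Int) := by
  induction i with
  | zero =>
    rw [PySem.List.pyRange_neg_one_cons (by omega)]
    rw [show ((0:Nat):Int) - 1 = (-1:Int) from by norm_num, pyRange_neg_nil]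
    rw [outerA_step ws 0 hi [], accPos_take_succ ws 0 hi]
    cases hla : lastAcc (ws.getD 0 []) with
    | some j => rfl
    | none => rfl
  | succ k ih =>
    rw [PySem.List.pyRange_neg_one_cons (by omega)]
    rw [show ((k+1:Nat):Int) - 1 = ((k:Nat):Int) from by push_cast; ring]
    rw [outerA_step ws (k+1) hi _, accPos_take_succ ws (k+1) hi]
    cases hla : lastAcc (ws.getD (k+1) []) with
    | some j => rfl
    | none => exact ih (by omega)

-- ---- B's marked matrix ----

theorem enumerate_map_getElem {α β : Type} (xs : List α) (s : Int) (f : Int × α → β)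
    (k : Nat) (hk : k < ((PySem.List.enumerate xs s).map f).length) :
    ((PySem.List.enumerate xs s).map f)[k] = f (s + (k : Int), xs[k]'(by simpa [PySem.List.length_enumerate] using hk)) := by
  have hk' : k < (PySem.List.enumerate xs s).length := by simpa using hk
  rw [List.getElem_map, PySem.List.getElem_enumerate]

theorem rowB_eq (w : List String) (i ai aj : Nat) :
    (PySem.List.enumerate w 0).map (fun js =>
        if ((i:Int) > (ai:Int)) ∨ ((i:Int) = (ai:Int) ∧ js.1 > (aj:Int)) then latex_add js.2 "flexpostaccent" else js.2) =
      if i < ai then w else if i = ai then rowMark w (aj+1) else rowMark w 0 := by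
  apply List.ext_getElem (by split_ifs <;> simp [rowMark, PySem.List.length_enumerate])
  intro j hj1 hj2
  rw [enumerate_map_getElem]
  by_cases hlt : i < ai
  · simp only [if_pos hlt] at hj2 ⊢
    rw [if_neg]
    push_cast
    omega
  · by_cases heq : i = ai
    · subst heq
      simp only [if_neg hlt, eq_self_iff_true, if_true] at hj2 ⊢
      by_cases hjj : aj < j
      · rw [if_pos (Or.inr ⟨trivial, by push_cast; omega⟩)]
        simp only [rowMark, List.getElem_mapIdx, if_pos (by omega : aj + 1 ≤ j)]
        rfl
      · rw [if_neg]
        · simp only [rowMark, List.getElem_mapIdx, if_neg (by omega : ¬ aj + 1 ≤ j)]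
        · push_cast
          omega
    · simp only [if_neg hlt, if_neg heq] at hj2 ⊢
      rw [if_pos (Or.inl (by push_cast; omega))]
      simp only [rowMark, List.getElem_mapIdx, if_pos (by omega : 0 ≤ j)]
      rfl

theorem bMarked_eq (ws : List (List String)) (ai aj : Nat) :
    (PySem.List.enumerate ws 0).map (fun iw =>
      (PySem.List.enumerate iw.2 0).map (fun js =>
        if iw.1 > (ai : Int) ∨ (iw.1 = (ai : Int) ∧ js.1 > (aj : Int)) then latex_add js.2 "flexpostaccent" else js.2)) =
      matAcc ws ai (aj+1) := by
  apply List.ext_getElem (by simp [matAcc, PySem.List.length_enumerate])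
  intro i h1 h2
  have hiw : i < ws.length := by simpa [PySem.List.length_enumerate] using h1
  rw [enumerate_map_getElem]
  simp only [zero_add]
  rw [rowB_eq (ws[i]'hiw) i ai aj]
  simp only [matAcc, List.getElem_mapIdx]

-- ===== auxiliary facts for the final assembly =====

theorem matNone_zero_eq (ws : List (List String)) :
    matNone ws 0 = ws.map (fun w => w.map (fun s => latex_add s "flexpostaccent")) := by
  apply List.ext_getElem (by simp [matNone])
  intro j h1 h2
  simp only [matNone, List.getElem_mapIdx, List.getElem_map, if_pos (Nat.zero_le j)]
  rw [rowMark_zero]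
  rfl

-- B's write block equals A's accent branch whenever some syllable precedes the accent
theorem bWrites_eq (ws : List (List String)) (ai aj : Nat)
    (hi : ai < ws.length) (hj : aj < (ws.getD ai []).length)
    (hnd : ¬ (ws.length = 1 ∧ (ws.getD ai []).length = 1)) :
    (let marked := matAcc ws ai (aj+1)
     if (ai:Int) == (ws.length:Int) - 1
         && (aj:Int) == ((PySem.List.pyGetD ws ((ai:Int)) []).length : Int) - 1 then
       let m1 := mSet marked (ai:Int) (aj:Int) (latex_add (mGet marked (ai:Int) (aj:Int)) "flexfinalsyllableaccent")
       if (aj:Int) > 0 then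
         mSet m1 (ai:Int) ((aj:Int)-1) (latex_add (mGet m1 (ai:Int) ((aj:Int)-1)) "flexvirtualfinalaccent")
       else if (ai:Int) > 0 then
         mSet m1 ((ai:Int)-1) (-1) (latex_add (mGet m1 ((ai:Int)-1) (-1)) "flexvirtualfinalaccent")
       else m1
     else
       mSet marked (ai:Int) (aj:Int) (latex_add (mGet marked (ai:Int) (aj:Int)) "flexfinalaccent"))
    = accWrite (ws.length:Int) (nsOf ws) (matAcc ws ai (aj+1)) (ai:Int) (aj:Int) := by
  rw [accWrite, nsOf_getD ws ai hi, PySem.List.pyGetD_natCast ws ai []]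
  cases hcond : ((ai:Int) == ((ws.length:Nat):Int) - 1 && (aj:Int) == (((ws.getD ai []).length:Nat):Int) - 1) with
  | false => rfl
  | true =>
    simp only [Bool.and_eq_true, beq_iff_eq] at hcond
    obtain ⟨hA, hB⟩ := hcond
    simp only [reduceIte]
    by_cases hajp : 0 < aj
    · rw [if_pos (by omega : ((ws.getD ai []).length : Int) > 1),
         if_pos (by exact_mod_cast hajp : (aj:Int) > 0)]
    · have haj0 : aj = 0 := by omega
      subst haj0
      have hlen1 : (ws.getD ai []).length = 1 := by omega
      have haip : 0 < ai := by
        rcases Nat.eq_zero_or_pos ai with h0 | h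
        · exact absurd ⟨by omega, hlen1⟩ hnd
        · exact h
      rw [if_neg (show ¬ (((0:Nat):Int) > 0) by norm_num)]
      rw [if_neg (show ¬ ((((ws.getD ai []).length:Nat):Int) > 1) by rw [hlen1]; norm_num)]
      rw [if_pos (show ((ai:Nat):Int) > 0 by exact_mod_cast haip)]

-- ---- tightness: inside D_ the two programs ALWAYS differ ----

theorem replace_caret_go (fuel : Nat) (l acc : List Char) (h : l.length ≤ fuel) :
    PySem.Chars.replace.go ['^'] [] fuel l acc = acc.reverse ++ l.filter (fun c => !(c == '^')) := by
  induction fuel generalizing l acc with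
  | zero =>
    have : l = [] := List.length_eq_zero_iff.mp (by omega)
    subst this
    simp [PySem.Chars.replace.go]
  | succ f ih =>
    cases l with
    | nil => simp [PySem.Chars.replace.go]
    | cons c t =>
      rw [PySem.Chars.replace.go]
      by_cases hc : c = '^'
      · subst hc
        rw [if_pos (by simp [List.isPrefixOf])]
        show PySem.Chars.replace.go ['^'] [] f t acc = _
        rw [ih t acc (by simp at h; omega)]
        simp
      · rw [if_neg (by simp [List.isPrefixOf]; exact fun he => hc he.symm)]
        rw [ih t (c :: acc) (by simp at h; omega)]
        simp [hc]

theorem replace_caret (s : String) :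
    PySem.Str.replace s "^" "" = String.ofList (s.toList.filter (fun c => !(c == '^'))) := by
  unfold PySem.Str.replace PySem.Chars.replace
  rw [show ("^" : String).toList = ['^'] from rfl, show ("" : String).toList = [] from rfl]
  rw [if_neg (by decide)]
  rw [replace_caret_go _ _ _ le_rfl]
  simp

theorem join_singleton (sep s : String) : PySem.Str.join sep [s] = s := by
  simp [PySem.Str.join, PySem.Chars.join, List.intercalate]

theorem mGet00 (s : String) : mGet [[s]] 0 0 = s := rfl

theorem mSet00 (s v : String) : mSet [[s]] 0 0 v = [[v]] := rfl

theorem mGetNeg (v : String) : mGet [[v]] (-1) (-1) = v := rfl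

theorem mSetNeg (v w : String) : mSet [[v]] (-1) (-1) w = [[w]] := rfl

theorem accWrite_single (s : String) :
    accWrite 1 [1] [[s]] 0 0 =
      [[latex_add (latex_add s "flexfinalsyllableaccent") "flexvirtualfinalaccent"]] := by
  unfold accWrite
  rw [if_pos (by decide)]
  simp only [mGet00, mSet00]
  rw [if_neg (by decide)]
  rw [show ((0 : Int) - 1) = (-1 : Int) from by decide]
  rw [mGetNeg, mSetNeg]

theorem outerA_single (s : String) (hacc : PySem.Str.isIn "^" s = true) :
    outerA 1 [1] [[s]] [0] =
      [[latex_add (latex_add s "flexfinalsyllableaccent") "flexvirtualfinalaccent"]] := by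
  show (let r := innerA 1 [1] [[s]] 0 (PySem.List.pyRange (PySem.List.pyGetD [1] 0 0 - 1) (-1) (-1));
        if r.2 then r.1 else outerA 1 [1] r.1 []) = _
  rw [show PySem.List.pyRange (PySem.List.pyGetD [(1:Int)] 0 0 - 1) (-1) (-1) = [0] from by decide]
  rw [innerA_accent 1 [1] [[s]] 0 0 [] (by rw [mGet00]; exact hacc)]
  show accWrite 1 [1] [[s]] 0 0 = _
  exact accWrite_single s

theorem lastAcc_single (s : String) (hacc : PySem.Str.isIn "^" s = true) :
    lastAcc [s] = some 0 := by
  simp only [lastAcc, hacc, reduceIte]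

theorem accPos_single (s : String) (hacc : PySem.Str.isIn "^" s = true) :
    accPos [[s]] = some (0, 0) := by
  simp only [accPos, lastAcc_single s hacc, Option.map_some]

theorem matAcc_single (s : String) : matAcc [[s]] 0 1 = [[s]] := by
  have h1 : rowMark [s] 1 = [s] := rowMark_length_self [s]
  apply List.ext_getElem (by simp [matAcc])
  intro j hj1 hj2
  have hj0 : j = 0 := by
    have : j < 1 := by simpa [matAcc] using hj1
    omega
  subst hj0
  simp [matAcc, h1]

-- ===== VERDICT (by name: the statements are the Claim_ definitions above) =====
theorem process_flex_spec : Claim_unchanged_process_flex := by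
  intro l _
  unfold Spec_process_flex
  intro hD
  unfold process_flex process_flex_alt
  simp only [PySem.List.slice_to_neg_one, PySem.List.foldl_append_singleton_eq_map,
    List.nil_append]
  have hsplit : (fun w => (PySem.Str.split? w "|").getD []) = pySplitBar := rfl
  rw [hsplit]
  set ws := l.dropLast.map pySplitBar with hws
  have hns : l.dropLast.map (fun w => ((pySplitBar w).length : Int)) = nsOf ws := by
    rw [nsOf, hws, List.map_map]; rfl
  have hlen : l.dropLast.length = ws.length := by rw [hws, List.length_map]
  rw [hns, hlen]
  by_cases h0 : ws.length = 0
  · rw [List.length_eq_zero_iff.mp h0]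
    simp only [List.length_nil, Nat.cast_zero, zero_sub]
    rw [pyRange_neg_nil]
    rfl
  · obtain ⟨n, hn⟩ : ∃ n, ws.length = n + 1 := ⟨ws.length - 1, by omega⟩
    have hni : n < ws.length := by omega
    have hstart : ws = matNone ws (n+1) := by rw [← hn, matNone_length_self]
    have hc : ((ws.length : Nat) : Int) - 1 = ((n:Nat):Int) := by rw [hn]; push_cast; ring
    rw [show PySem.List.pyRange (((ws.length : Nat) : Int) - 1) (-1) (-1)
          = PySem.List.pyRange ((n:Nat):Int) (-1) (-1) from by rw [hc]]
    rw [show outerA ((ws.length:Int)) (nsOf ws) ws (PySem.List.pyRange ((n:Nat):Int) (-1) (-1))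
          = outerA ((ws.length:Int)) (nsOf ws) (matNone ws (n+1)) (PySem.List.pyRange ((n:Nat):Int) (-1) (-1)) from by
        rw [← hstart]]
    rw [outerA_char ws n hni]
    rw [show ws.take (n+1) = ws from by rw [← hn]; exact List.take_length]
    rw [bAcc_eq]
    cases hacc : accPos ws with
    | none =>
      simp only [Option.map_none]
      rw [matNone_zero_eq]
      rfl
    | some p =>
      obtain ⟨ai, aj⟩ := p
      simp only [Option.map_some]
      obtain ⟨hi, hj, haccel⟩ := accPos_bounds ws ai aj hacc
      have hj' : aj < (ws.getD ai []).length := by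
        rw [List.getD_eq_getElem?_getD, List.getElem?_eq_getElem hi]; exact hj
      have hgw : ws.getD ai [] = ws[ai] := by
        rw [List.getD_eq_getElem?_getD, List.getElem?_eq_getElem hi]; rfl
      have haccD : PySem.Str.isIn "^" ((ws.getD ai []).getD aj "") = true := by
        rw [hgw, List.getD_eq_getElem?_getD, List.getElem?_eq_getElem hj]; exact haccel
      have hnd : ¬ (ws.length = 1 ∧ (ws.getD ai []).length = 1) := by
        rintro ⟨hw1, hr1⟩
        have hai0 : ai = 0 := by omega
        have haj0 : aj = 0 := by omega
        subst hai0; subst haj0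
        apply hD
        have hl2 : l.length = 2 := by
          have := @List.length_dropLast _ l
          omega
        obtain ⟨x, y, rfl⟩ := List.length_eq_two.mp hl2
        have hg0 : ws.getD 0 [] = pySplitBar x := by rw [hws]; rfl
        refine ⟨rfl, ?_, ?_⟩
        · show (pySplitBar x).length = 1
          rw [← hg0]; exact hr1
        · show PySem.Str.isIn "^" ((pySplitBar x).getD 0 "") = true
          rw [← hg0]; exact haccD
      rw [bMarked_eq]
      exact congrArg (fun (m : List (List String)) =>
        PySem.Str.replace (PySem.Str.join " " (List.map (fun w => PySem.Str.join "" w) m) ++ " \\flexsymbol") "^" "")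
        (bWrites_eq ws ai aj hi hj' hnd).symm

theorem process_flex_changed : Claim_changed_process_flex := by
  unfold Claim_changed_process_flex; decide


theorem process_flex_tight : Claim_exact_process_flex := by
  intro l _ hD
  obtain ⟨hl2, hlen1, hacc⟩ := hD
  obtain ⟨x, y, rfl⟩ := List.length_eq_two.mp hl2
  obtain ⟨s, hs⟩ : ∃ s, pySplitBar x = [s] := by
    have h1 : (pySplitBar x).length = 1 := hlen1
    exact List.length_eq_one_iff.mp h1
  have haccs : PySem.Str.isIn "^" s = true := by
    have h0 : ((PySem.Str.split? (([x, y] : List String).getD 0 "") "|").getD []).getD 0 "" = s := by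
      show (pySplitBar x).getD 0 "" = s
      rw [hs]; rfl
    rw [h0] at hacc; exact hacc
  -- A's value on [x, y]
  have hA : process_flex [x, y] =
      PySem.Str.replace
        (latex_add (latex_add s "flexfinalsyllableaccent") "flexvirtualfinalaccent"
          ++ " \\flexsymbol") "^" "" := by
    unfold process_flex
    simp only [PySem.List.slice_to_neg_one]
    rw [show ([x, y] : List String).dropLast = [x] from rfl]
    simp only [List.foldl_cons, List.foldl_nil, List.nil_append, hs]
    rw [show ((([x] : List String).length : Nat) : Int) = (1 : Int) from rfl,
        show ((([s] : List String).length : Nat) : Int) = (1 : Int) from rfl]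
    rw [show PySem.List.pyRange ((1 : Int) - 1) (-1) (-1) = [0] from by decide]
    rw [outerA_single s haccs]
    simp only [List.foldl_cons, List.foldl_nil, List.nil_append]
    rw [join_singleton, join_singleton]
  -- B's value on [x, y]
  have hacc3 : bAcc [[s]] = some (0, 0) := by
    rw [bAcc_eq, accPos_single s haccs]; rfl
  have hb : (List.map (fun iw =>
      List.map (fun js => if iw.1 > (0 : Int) ∨ iw.1 = (0 : Int) ∧ js.1 > (0 : Int)
          then latex_add js.2 "flexpostaccent" else js.2)
        (PySem.List.enumerate iw.2 0)) (PySem.List.enumerate ([[s]] : List (List String)) 0)) = [[s]] := by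
    have hb0 := bMarked_eq [[s]] 0 0
    simp only [Nat.cast_zero] at hb0
    rw [hb0]
    exact matAcc_single s
  have hB : process_flex_alt [x, y] =
      PySem.Str.replace (latex_add s "flexfinalsyllableaccent" ++ " \\flexsymbol") "^" "" := by
    unfold process_flex_alt
    simp only [PySem.List.slice_to_neg_one]
    rw [show ([x, y] : List String).dropLast = [x] from rfl]
    rw [show ([x] : List String).map (fun w => (PySem.Str.split? w "|").getD []) = [[s]] from by
      simp only [List.map_cons, List.map_nil]
      rw [show (PySem.Str.split? x "|").getD [] = pySplitBar x from rfl, hs]]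
    simp only [hacc3, hb]
    rw [show PySem.List.pyGetD ([[s]] : List (List String)) (0 : Int) [] = [s] from rfl]
    rw [show ((([[s]] : List (List String)).length : Nat) : Int) = (1 : Int) from rfl,
        show ((([s] : List String).length : Nat) : Int) = (1 : Int) from rfl]
    rw [if_pos (by decide)]
    simp only [mGet00, mSet00]
    rw [if_neg (by decide), if_neg (by decide)]
    unfold bFinish
    simp only [List.map_cons, List.map_nil]
    rw [join_singleton, join_singleton]
  rw [hA, hB, replace_caret, replace_caret]
  intro heq
  have hl := congrArg String.toList heq
  simp only [String.toList_ofList] at hl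
  have hlen := congrArg List.length hl
  rw [show (latex_add (latex_add s "flexfinalsyllableaccent") "flexvirtualfinalaccent"
        ++ " \\flexsymbol" : String).toList
      = "\\flexvirtualfinalaccent{".toList
        ++ (latex_add s "flexfinalsyllableaccent").toList ++ "} \\flexsymbol".toList from by
    simp [latex_add]] at hlen
  rw [show (latex_add s "flexfinalsyllableaccent" ++ " \\flexsymbol" : String).toList
      = (latex_add s "flexfinalsyllableaccent").toList ++ (" \\flexsymbol" : String).toList from by
    simp] at hlen
  simp only [List.filter_append, List.length_append] at hlen
  rw [show (("\\flexvirtualfinalaccent{" : String).toList.filter (fun c => !(c == '^'))).length = 24 from by decide] at hlen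
  rw [show (("} \\flexsymbol" : String).toList.filter (fun c => !(c == '^'))).length = 13 from by decide] at hlen
  rw [show ((" \\flexsymbol" : String).toList.filter (fun c => !(c == '^'))).length = 12 from by decide] at hlen
  omega
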